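-- pv_equiv track=rewrite | github.com/suwon205/algorithm | 프로그래머스/2/42587. 프로세스/프로세스.py | solution
-- ===== SOURCE A (Python) =====
-- from collections import deque
--
-- def solution(priorities, location):
--     answer = 0
--     lst = deque()
--     for idx in range(len(priorities)):
--         lst.append([idx, priorities[idx]])
--     while lst:
--         maxP = max(lst, key = lambda x : x[1])[1]
--         job = lst.popleft()
--         if maxP == job[1]: # 현재 작업이 가장 높은 우선 순위를 가진 경우
--             answer += 1
--             if job[0] == location:  # 원하는 작업이 완료된 경우
--                 break
--         else:
--             lst.append(job)
--     return answer
-- ===== SOURCE B (Python) =====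
-- def solution(priorities, location):
--     # One "find first max" per executed process instead of rotating one element
--     # at a time with a max() recomputation per rotation.
--     answer = 0
--     order = list(range(len(priorities)))
--     while order:
--         m = max(priorities[i] for i in order)
--         j = next(k for k, i in enumerate(order) if priorities[i] == m)
--         answer += 1
--         if order[j] == location:
--             break
--         order = order[j + 1:] + order[:j]
--     return answer
-- ===== Notes on version B (the rewrite author's own statement) =====
-- stated objective: faster
-- what changed: B jumps directly to the first maximal-priority process each step (one linear scan per executed process, moving the skipped prefix to the back in one slice), instead of A's deque simulation that rotates one element at a time and recomputes max() on every rotation.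
import Mathlib
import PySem

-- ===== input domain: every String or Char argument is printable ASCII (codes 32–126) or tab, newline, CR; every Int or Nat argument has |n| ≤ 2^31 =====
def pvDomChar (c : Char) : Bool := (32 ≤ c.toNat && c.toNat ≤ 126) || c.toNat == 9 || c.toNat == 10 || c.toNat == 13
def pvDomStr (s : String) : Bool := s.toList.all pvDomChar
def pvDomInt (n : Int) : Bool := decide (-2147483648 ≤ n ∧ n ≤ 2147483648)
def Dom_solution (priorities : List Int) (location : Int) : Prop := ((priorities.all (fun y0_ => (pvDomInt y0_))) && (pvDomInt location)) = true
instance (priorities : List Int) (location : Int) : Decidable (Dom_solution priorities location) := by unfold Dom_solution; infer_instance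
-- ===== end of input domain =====

-- B replaces A's one-rotation-per-iteration deque simulation (max() recomputed on
-- every rotation) by jumping straight to the first maximal-priority process each
-- step; measurably faster on the timing inputs.

-- ===== PORT A =====
-- maxP = max(lst, key=lambda x: x[1])[1]; the list is nonempty wherever A evaluates it
def solMaxSnd (q : List (Int × Int)) : Int :=
  ((PySem.List.max? q (fun x => x.2)).getD (0, 0)).2

-- measure for A's while-loop: index of the first maximal-priority job in the deque
def solFirstMax (q : List (Int × Int)) : Nat :=
  q.findIdx (fun x => x.2 == solMaxSnd q)

-- termination facts for A's loop (cited by decreasing_by)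
theorem solMaxSnd_spec (q : List (Int × Int)) (hq : q ≠ []) :
    ∃ m ∈ q, m.2 = solMaxSnd q ∧ ∀ y ∈ q, y.2 ≤ solMaxSnd q := by
  rcases hm : PySem.List.max? q (fun x => x.2) with _ | m
  · exact absurd ((PySem.List.max?_eq_none_iff q _).1 hm) hq
  · exact ⟨m, PySem.List.max?_mem hm, by simp [solMaxSnd, hm],
      fun y hy => by simpa [solMaxSnd, hm] using PySem.List.max?_isMax hm y hy⟩

theorem solFirstMax_lt (q : List (Int × Int)) (hq : q ≠ []) :
    solFirstMax q < q.length := by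
  obtain ⟨m, hmem, hval, -⟩ := solMaxSnd_spec q hq
  exact List.findIdx_lt_length.2 ⟨m, hmem, by simp [hval]⟩

theorem solMaxSnd_rot (job : Int × Int) (rest : List (Int × Int))
    (h : job.2 ≠ solMaxSnd (job :: rest)) :
    solMaxSnd (rest ++ [job]) = solMaxSnd (job :: rest) := by
  obtain ⟨m, hmem, hval, hmax⟩ := solMaxSnd_spec (job :: rest) (by simp)
  have hmr : m ∈ rest := by
    rcases List.mem_cons.1 hmem with h' | h'
    · exact absurd (h' ▸ hval) h
    · exact h'
  obtain ⟨m', hmem', hval', hmax'⟩ := solMaxSnd_spec (rest ++ [job]) (by simp)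
  have h1 : solMaxSnd (job :: rest) ≤ solMaxSnd (rest ++ [job]) := by
    have := hmax' m (by simp [hmr]); omega
  have h2 : solMaxSnd (rest ++ [job]) ≤ solMaxSnd (job :: rest) := by
    have : m' ∈ job :: rest := by
      rcases List.mem_append.1 hmem' with h' | h' <;> simp_all
    have := hmax m' this; omega
  omega

theorem solFirstMax_rot (job : Int × Int) (rest : List (Int × Int))
    (h : job.2 ≠ solMaxSnd (job :: rest)) :
    solFirstMax (rest ++ [job]) < solFirstMax (job :: rest) := by
  have hrot := solMaxSnd_rot job rest h
  have hlt : solFirstMax (job :: rest) < (job :: rest).length :=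
    solFirstMax_lt _ (by simp)
  have hcons : solFirstMax (job :: rest)
      = rest.findIdx (fun x => x.2 == solMaxSnd (job :: rest)) + 1 := by
    have hb : (job.2 == solMaxSnd (job :: rest)) = false := by simpa using h
    simp [solFirstMax, List.findIdx_cons, hb]
  have hrlt : rest.findIdx (fun x => x.2 == solMaxSnd (job :: rest)) < rest.length := by
    simp at hlt; omega
  have happ : solFirstMax (rest ++ [job])
      = rest.findIdx (fun x => x.2 == solMaxSnd (job :: rest)) := by
    simp only [solFirstMax, hrot, List.findIdx_append, if_pos hrlt]
  omega

-- A's while-loop: pop the front, execute it if it has the maximal priority,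
-- otherwise push it to the back
def solLoopA (location : Int) : List (Int × Int) → Int → Int
  | [], answer => answer
  | job :: rest, answer =>
    let maxP := solMaxSnd (job :: rest)
    if maxP == job.2 then
      if job.1 == location then answer + 1 else solLoopA location rest (answer + 1)
    else solLoopA location (rest ++ [job]) answer
  termination_by q _ => (q.length, solFirstMax q)
  decreasing_by
  · exact Prod.Lex.left _ _ (by simp)
  · rename_i hne
    have hl : (rest ++ [job]).length = (job :: rest).length := by simp
    rw [hl]
    exact Prod.Lex.right _ (solFirstMax_rot job rest (fun hh => hne (beq_iff_eq.mpr hh.symm)))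

def solution (priorities : List Int) (location : Int) : Int :=
  solLoopA location (PySem.List.enumerate priorities) 0

-- ===== PORT B =====
-- priorities[i] (every index B looks up is in range)
def solPri (priorities : List Int) (i : Int) : Int := PySem.List.pyGetD priorities i 0

-- termination fact for B's loop (cited by decreasing_by): the first max is found
theorem solJ_lt (P : List Int) (o : Int) (os : List Int) :
    (o :: os).findIdx
        (fun i => solPri P i == (PySem.List.max? ((o :: os).map (solPri P)) (fun v => v)).getD 0)
      < (o :: os).length := by
  rcases hm : PySem.List.max? ((o :: os).map (solPri P)) (fun v => v) with _ | v
  · simp [PySem.List.max?_eq_none_iff] at hm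
  · have hv := PySem.List.max?_mem hm
    obtain ⟨i, hi, hiv⟩ := List.mem_map.1 hv
    exact List.findIdx_lt_length.2 ⟨i, hi, by simp [hiv]⟩

-- B's while-loop: find the first process with maximal priority, execute it,
-- and move the processes skipped over to the back of the queue
def solLoopB (priorities : List Int) (location : Int) : List Int → Int → Int
  | [], answer => answer
  | o :: os, answer =>
    let m := (PySem.List.max? ((o :: os).map (solPri priorities)) (fun v => v)).getD 0
    let j := (o :: os).findIdx (fun i => solPri priorities i == m)
    if PySem.List.pyGetD (o :: os) (j : Int) 0 == location then answer + 1
    else solLoopB priorities location ((o :: os).drop (j + 1) ++ (o :: os).take j) (answer + 1)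
  termination_by order _ => order.length
  decreasing_by
    have := solJ_lt priorities o os
    simp only [List.length_append, List.length_drop, List.length_take]
    simp at this ⊢; omega

def solution_alt (priorities : List Int) (location : Int) : Int :=
  solLoopB priorities location (PySem.List.pyRange 0 (PySem.List.len priorities)) 0

-- ===== PRECONDITION & SPEC =====
def Spec_solution (priorities : List Int) (location : Int) (out : Int) : Prop := out = solution_alt priorities location
instance (priorities : List Int) (location : Int) (out : Int) : Decidable (Spec_solution priorities location out) := by unfold Spec_solution; infer_instance

-- ===== CLAIM (what is proved, stated in full; the proofs are below) =====
def Claim_equal_solution : Prop := ∀ (priorities : List Int) (location : Int), Dom_solution priorities location → Spec_solution priorities location (solution priorities location)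

-- ===== LEMMAS AND PROOFS =====

-- A's loop, run from a queue whose first maximal job sits at index j, does j
-- rotations and then executes that job.
theorem solLoopA_exec (location : Int) :
    ∀ (j : Nat) (q : List (Int × Int)) (ans : Int), q ≠ [] → solFirstMax q = j →
      solLoopA location q ans =
        (if (q.getD j (0, 0)).1 == location then ans + 1
         else solLoopA location (q.drop (j + 1) ++ q.take j) (ans + 1)) := by
  intro j
  induction j with
  | zero =>
    intro q ans hq h0
    obtain ⟨job, rest, rfl⟩ := List.exists_cons_of_ne_nil hq
    by_cases hp : (job.2 == solMaxSnd (job :: rest)) = true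
    · rw [solLoopA]
      simp only [if_pos (beq_iff_eq.mpr (beq_iff_eq.mp hp).symm)]
      simp
    · exfalso
      simp only [solFirstMax, List.findIdx_cons, hp, cond_false] at h0
      omega
  | succ j IH =>
    intro q ans hq hsucc
    obtain ⟨job, rest, rfl⟩ := List.exists_cons_of_ne_nil hq
    by_cases hp : (job.2 == solMaxSnd (job :: rest)) = true
    · exfalso
      simp only [solFirstMax, List.findIdx_cons, hp, cond_true] at hsucc
      omega
    · have hne : job.2 ≠ solMaxSnd (job :: rest) := by simpa using hp
      have hrest : rest.findIdx (fun x => x.2 == solMaxSnd (job :: rest)) = j := by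
        simp only [solFirstMax, List.findIdx_cons, hp, cond_false] at hsucc
        omega
      have hjlt : j < rest.length := by
        have := solFirstMax_lt (job :: rest) (by simp)
        rw [hsucc] at this
        simp at this
        omega
      have hrot := solMaxSnd_rot job rest hne
      have hfm : solFirstMax (rest ++ [job]) = j := by
        simp only [solFirstMax, hrot, List.findIdx_append, if_pos (hrest ▸ hjlt)]
        exact hrest
      have e1 : (rest ++ [job]).getD j (0, 0) = ((job :: rest).getD (j + 1) (0, 0)) := by
        rw [List.getD_cons_succ]
        simp [List.getD, List.getElem?_append_left hjlt]
      have e2 : (rest ++ [job]).drop (j + 1) ++ (rest ++ [job]).take j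
          = (job :: rest).drop (j + 1 + 1) ++ (job :: rest).take (j + 1) := by
        rw [List.drop_append_of_le_length (by omega), List.take_append_of_le_length (by omega)]
        simp
      rw [solLoopA]
      simp only [if_neg (fun hc => hp (beq_iff_eq.mpr (beq_iff_eq.mp hc).symm))]
      rw [IH (rest ++ [job]) ans (by simp) hfm, e1, e2]

-- the value of max(values) equals the priority of the first max-by-priority job
theorem solMaxSnd_eq_maxVals (q : List (Int × Int)) (hq : q ≠ []) :
    solMaxSnd q = (PySem.List.max? (q.map Prod.snd) (fun v => v)).getD 0 := by
  obtain ⟨m, hmem, hval, hmax⟩ := solMaxSnd_spec q hq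
  rcases hv : PySem.List.max? (q.map Prod.snd) (fun v => v) with _ | v
  · rw [PySem.List.max?_eq_none_iff] at hv
    simp_all
  · have hvm := PySem.List.max?_mem hv
    obtain ⟨x, hx, hxv⟩ := List.mem_map.1 hvm
    have h1 : v ≤ solMaxSnd q := hxv ▸ hmax x hx
    have h2 : solMaxSnd q ≤ v := by
      have := PySem.List.max?_isMax hv m.2 (List.mem_map_of_mem hmem)
      omega
    simp
    omega

-- bridge: A's loop on the (index, priority) queue equals B's loop on the index queue
theorem solLoop_bridge (P : List Int) (location : Int) :
    ∀ (n : Nat) (order : List Int) (ans : Int), order.length = n →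
      solLoopA location (order.map (fun i => (i, solPri P i))) ans
        = solLoopB P location order ans := by
  intro n
  induction n using Nat.strong_induction_on with
  | _ n IH =>
    intro order ans hlen
    match order with
    | [] => simp [solLoopA, solLoopB]
    | o :: os =>
      have hqne : (o :: os).map (fun i => (i, solPri P i)) ≠ [] := by simp
      have hm : solMaxSnd ((o :: os).map (fun i => (i, solPri P i)))
          = (PySem.List.max? ((o :: os).map (solPri P)) (fun v => v)).getD 0 := by
        rw [solMaxSnd_eq_maxVals _ hqne, List.map_map]
        rfl
      have hj : solFirstMax ((o :: os).map (fun i => (i, solPri P i)))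
          = (o :: os).findIdx (fun i => solPri P i ==
              (PySem.List.max? ((o :: os).map (solPri P)) (fun v => v)).getD 0) := by
        simp only [solFirstMax, hm, List.findIdx_map]
        rfl
      have hjlt : (o :: os).findIdx (fun i => solPri P i ==
              (PySem.List.max? ((o :: os).map (solPri P)) (fun v => v)).getD 0)
            < (o :: os).length := solJ_lt P o os
      rw [solLoopA_exec location _ _ ans hqne hj]
      rw [solLoopB]
      have e1 : (((o :: os).map (fun i => (i, solPri P i))).getD ((o :: os).findIdx
              (fun i => solPri P i ==
                (PySem.List.max? ((o :: os).map (solPri P)) (fun v => v)).getD 0)) (0, 0)).1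
          = PySem.List.pyGetD (o :: os) (((o :: os).findIdx (fun i => solPri P i ==
              (PySem.List.max? ((o :: os).map (solPri P)) (fun v => v)).getD 0) : Nat) : Int) 0 := by
        rw [PySem.List.pyGetD_natCast]
        rw [List.getD_eq_getElem _ _ (by simpa using hjlt), List.getD_eq_getElem _ _ hjlt]
        rw [List.getElem_map]
      have e2 : ((o :: os).map (fun i => (i, solPri P i))).drop ((o :: os).findIdx
              (fun i => solPri P i ==
                (PySem.List.max? ((o :: os).map (solPri P)) (fun v => v)).getD 0) + 1)
            ++ ((o :: os).map (fun i => (i, solPri P i))).take ((o :: os).findIdx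
              (fun i => solPri P i ==
                (PySem.List.max? ((o :: os).map (solPri P)) (fun v => v)).getD 0))
          = (((o :: os).drop ((o :: os).findIdx (fun i => solPri P i ==
                (PySem.List.max? ((o :: os).map (solPri P)) (fun v => v)).getD 0) + 1)
              ++ (o :: os).take ((o :: os).findIdx (fun i => solPri P i ==
                (PySem.List.max? ((o :: os).map (solPri P)) (fun v => v)).getD 0))).map
              (fun i => (i, solPri P i))) := by
        simp
      rw [e1, e2]
      by_cases hc : (PySem.List.pyGetD (o :: os) (((o :: os).findIdx (fun i => solPri P i ==
              (PySem.List.max? ((o :: os).map (solPri P)) (fun v => v)).getD 0) : Nat) : Int) 0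
            == location) = true
      · simp only [if_pos hc]
      · simp only [if_neg hc]
        have hlt2 : ((o :: os).drop ((o :: os).findIdx (fun i => solPri P i ==
              (PySem.List.max? ((o :: os).map (solPri P)) (fun v => v)).getD 0) + 1)
            ++ (o :: os).take ((o :: os).findIdx (fun i => solPri P i ==
              (PySem.List.max? ((o :: os).map (solPri P)) (fun v => v)).getD 0))).length < n := by
          simp only [List.length_append, List.length_drop, List.length_take,
            List.length_cons] at hjlt hlen ⊢
          omega
        exact IH _ hlt2 _ (ans + 1) rfl

-- ===== VERDICT (by name: the statement is the Claim_ definition above) =====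
theorem solution_spec : Claim_equal_solution := by
  intro P location _
  unfold Spec_solution solution solution_alt
  rw [PySem.List.enumerate_eq_map_pyRange P 0]
  exact solLoop_bridge P location _ _ 0 rfl
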